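-- pv_equiv track=rewrite | github.com/SamuelPPlab/Projeto-Restaurant-Orders | src/analyze_log.py | days_never_visited
-- ===== SOURCE A (Python) =====
-- def days_never_visited(customer, all_orders):
--     get_all_days = {
--         week_day['k3_week_day']
--         for week_day in all_orders
--     }
--     days_in = {
--         week_day['k3_week_day']
--         for week_day in all_orders
--         if week_day['k1_customer'] == customer
--     }
--     days_out = get_all_days ^ days_in
--     return days_out
-- ===== SOURCE B (Python) =====
-- def days_never_visited(customer, all_orders):
--     visited = {}
--     for order in all_orders:
--         day = order['k3_week_day']
--         visited[day] = visited.get(day, False) or (order['k1_customer'] == customer)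
--     return {day for day, seen in visited.items() if not seen}
-- ===== Notes on version B (the rewrite author's own statement) =====
-- stated objective: alternative
-- what changed: Replaces the two set comprehensions combined with symmetric difference by a single pass that maintains one per-day visited flag in a dict, then filters the unvisited days.
import Mathlib
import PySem

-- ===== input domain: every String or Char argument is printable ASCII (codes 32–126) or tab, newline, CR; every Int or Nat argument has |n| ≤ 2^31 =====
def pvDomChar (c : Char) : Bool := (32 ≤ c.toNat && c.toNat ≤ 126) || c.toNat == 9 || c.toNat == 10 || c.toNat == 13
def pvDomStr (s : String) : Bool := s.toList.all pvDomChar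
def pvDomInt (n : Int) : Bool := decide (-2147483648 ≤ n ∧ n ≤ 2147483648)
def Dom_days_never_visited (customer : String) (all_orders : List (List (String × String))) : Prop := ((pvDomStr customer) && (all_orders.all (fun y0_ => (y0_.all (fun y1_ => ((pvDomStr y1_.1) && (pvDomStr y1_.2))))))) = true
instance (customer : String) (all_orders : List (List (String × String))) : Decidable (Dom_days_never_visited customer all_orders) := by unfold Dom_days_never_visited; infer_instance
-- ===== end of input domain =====

-- B replaces A's two set comprehensions + symmetric difference by a single pass maintaining a
-- per-day visited flag in a dict, then filtering the unvisited days (alternative decomposition).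


-- ===== PORT A =====
-- week_day['k3_week_day'] / ['k1_customer']: Pre_ guarantees the keys are present, so getD is
-- exact there (Python raises KeyError where the key is missing; those inputs are outside Pre_).
def days_never_visited (customer : String) (all_orders : List (List (String × String))) : List String :=
  let get_all_days : PySem.Set String :=
    PySem.Set.ofList (all_orders.map (fun week_day => (PySem.Dict.mk week_day).getD "k3_week_day" ""))
  let days_in : PySem.Set String :=
    PySem.Set.ofList ((all_orders.filter
        (fun week_day => (PySem.Dict.mk week_day).getD "k1_customer" "" == customer)).map
      (fun week_day => (PySem.Dict.mk week_day).getD "k3_week_day" ""))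
  let days_out := PySem.Set.symmDiff get_all_days days_in
  days_out

-- ===== PORT B =====
def days_never_visited_alt (customer : String) (all_orders : List (List (String × String))) : List String :=
  let visited : PySem.Dict String Bool :=
    all_orders.foldl (fun d order =>
      d.insert ((PySem.Dict.mk order).getD "k3_week_day" "")
        (d.getD ((PySem.Dict.mk order).getD "k3_week_day" "") false
          || ((PySem.Dict.mk order).getD "k1_customer" "" == customer))) PySem.Dict.empty
  (visited.items.filter (fun p => !p.2)).map (·.1)

-- ===== PRECONDITION & SPEC =====
-- Pre_ excludes exactly the inputs where Python A raises KeyError: an order missing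
-- the 'k3_week_day' or 'k1_customer' key.
def Pre_days_never_visited (customer : String) (all_orders : List (List (String × String))) : Prop :=
  ∀ o ∈ all_orders, (PySem.Dict.mk o).contains "k3_week_day" = true ∧ (PySem.Dict.mk o).contains "k1_customer" = true
instance (customer : String) (all_orders : List (List (String × String))) : Decidable (Pre_days_never_visited customer all_orders) := by unfold Pre_days_never_visited; infer_instance

def pvWitness_days_never_visited : String × (List (List (String × String))) :=
  ("Ana", [[("k1_customer", "Ana"), ("k3_week_day", "mon")],
           [("k1_customer", "Bob"), ("k3_week_day", "tue")]])

def Spec_days_never_visited (customer : String) (all_orders : List (List (String × String))) (out : List String) : Prop := out = days_never_visited_alt customer all_orders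
instance (customer : String) (all_orders : List (List (String × String))) (out : List String) : Decidable (Spec_days_never_visited customer all_orders out) := by unfold Spec_days_never_visited; infer_instance

-- ===== CLAIM (what is proved, stated in full; the proofs are below) =====
def Claim_equal_days_never_visited : Prop := ∀ (customer : String) (all_orders : List (List (String × String))), Dom_days_never_visited customer all_orders → Pre_days_never_visited customer all_orders → Spec_days_never_visited customer all_orders (days_never_visited customer all_orders)

-- ===== LEMMAS AND PROOFS =====

-- the flag B's dict holds at key k after the loop: initial flag OR "some order with day k matches customer"
theorem pv_getD_fold (customer : String) (l : List (List (String × String)))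
    (d : PySem.Dict String Bool) (k : String) :
    (l.foldl (fun d order =>
      d.insert ((PySem.Dict.mk order).getD "k3_week_day" "")
        (d.getD ((PySem.Dict.mk order).getD "k3_week_day" "") false
          || ((PySem.Dict.mk order).getD "k1_customer" "" == customer))) d).getD k false
    = (d.getD k false
        || l.any (fun order => ((PySem.Dict.mk order).getD "k3_week_day" "" == k)
            && ((PySem.Dict.mk order).getD "k1_customer" "" == customer))) := by
  induction l generalizing d with
  | nil => simp
  | cons o l ih =>
    simp only [List.foldl_cons, List.any_cons, ih, PySem.Dict.getD_insert]
    by_cases h : k = (PySem.Dict.mk o).getD "k3_week_day" ""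
    · subst h; simp [Bool.or_assoc]
    · have : ((PySem.Dict.mk o).getD "k3_week_day" "" == k) = false := by
        simp only [beq_eq_false_iff_ne, ne_eq]; exact fun e => h e.symm
      simp [h, this]

theorem days_never_visited_eq (customer : String) (all_orders : List (List (String × String))) :
    days_never_visited customer all_orders = days_never_visited_alt customer all_orders := by
  unfold days_never_visited days_never_visited_alt
  simp only
  set k3 : List (String × String) → String := fun o => (PySem.Dict.mk o).getD "k3_week_day" "" with hk3
  set prd : List (String × String) → Bool := fun o => (PySem.Dict.mk o).getD "k1_customer" "" == customer with hprd
  set visited : PySem.Dict String Bool :=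
    all_orders.foldl (fun d order =>
      d.insert (k3 order) (d.getD (k3 order) false || prd order)) PySem.Dict.empty with hv
  have hnodup : visited.keys.Nodup := by
    rw [hv]; exact PySem.Dict.nodup_keys_foldl_insert_key all_orders k3 _ _ (by simp)
  have hkeys : visited.keys = PySem.Set.ofList (all_orders.map k3) := by
    rw [hv, PySem.Dict.keys_foldl_insert_key]
    rfl
  -- B = allDays filtered by "no visiting order"
  have hB : (visited.items.filter (fun p => !p.2)).map (·.1)
      = (PySem.Set.ofList (all_orders.map k3)).filter
          (fun k => !(all_orders.any (fun o => (k3 o == k) && prd o))) := by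
    rw [PySem.Dict.items_eq_map_keys visited hnodup false]
    rw [List.filter_map, List.map_map, hkeys]
    have hval : ∀ k : String, visited.getD k false
        = all_orders.any (fun o => (k3 o == k) && prd o) := by
      intro k
      rw [hv, pv_getD_fold customer all_orders PySem.Dict.empty k]
      simp only [PySem.Dict.getD_empty, Bool.false_or]
      rfl
    simp only [Function.comp_def]
    rw [show ((fun (k : String) => ((k, visited.getD k false) : String × Bool).1)) = fun k => k from rfl,
        List.map_id']
    apply List.filter_congr
    intro k _
    simp only [hval k]
  rw [hB]
  -- A = allDays \ days_in ++ [] and pointwise the same filter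
  unfold PySem.Set.symmDiff
  have hempty : PySem.Set.diff
      (PySem.Set.ofList ((all_orders.filter prd).map k3))
      (PySem.Set.ofList (all_orders.map k3)) = [] := by
    unfold PySem.Set.diff
    rw [List.filter_eq_nil_iff]
    intro x hx
    have hx' : x ∈ (all_orders.filter prd).map k3 := (PySem.Set.mem_ofList _ _).mp hx
    have : x ∈ all_orders.map k3 := by
      rcases List.mem_map.mp hx' with ⟨o, ho, rfl⟩
      exact List.mem_map_of_mem (List.mem_of_mem_filter ho)
    have hmem : x ∈ PySem.Set.ofList (all_orders.map k3) := (PySem.Set.mem_ofList _ _).mpr this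
    simp [PySem.Set.contains, hmem]
  rw [hempty, List.append_nil]
  unfold PySem.Set.diff
  apply List.filter_congr
  intro k _
  congr 1
  -- membership in days_in ↔ some order matches
  rw [Bool.eq_iff_iff]
  simp only [PySem.Set.contains, List.contains_iff_mem, PySem.Set.mem_ofList,
    List.mem_map, List.mem_filter, List.any_eq_true, Bool.and_eq_true, beq_iff_eq]
  constructor
  · rintro ⟨o, ⟨ho, hp⟩, rfl⟩; exact ⟨o, ho, rfl, hp⟩
  · rintro ⟨o, ho, he, hp⟩; exact ⟨o, ⟨ho, hp⟩, he⟩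

-- ===== VERDICT (by name: the statement is the Claim_ definition above) =====
theorem days_never_visited_spec : Claim_equal_days_never_visited := by
  intro customer all_orders _ _
  unfold Spec_days_never_visited
  exact days_never_visited_eq customer all_orders
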